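-- pv_equiv track=rewrite | github.com/mixlo/anglerfish-maze | level_generator.py | create_collision_map
-- ===== SOURCE A (Python) =====
-- WALL = 1
--
-- def create_collision_map(maze, rows, cols):
--     cmap = [[0 for _ in range(cols)] for _ in range(rows)]
--     for row in range(rows):
--         for col in range(cols):
--             b = row < rows-1 and maze[row+1][col] == WALL
--             l = col > 0      and maze[row][col-1] == WALL
--             t = row > 0      and maze[row-1][col] == WALL
--             r = col < cols-1 and maze[row][col+1] == WALL
--
--             if maze[row][col] == WALL:
--                 if all((b, l, t, r)):
--                     cmap[row][col] = 15
--             else: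
--                 if b: cmap[row+1][col] |= 1
--                 if l: cmap[row][col-1] |= 2
--                 if t: cmap[row-1][col] |= 4
--                 if r: cmap[row][col+1] |= 8
--     return cmap
-- ===== SOURCE B (Python) =====
-- WALL = 1
--
-- def create_collision_map(maze, rows, cols):
--     # Gather: compute each cell's mask directly from its own neighbours.
--     def cell(r, c):
--         if maze[r][c] != WALL:
--             return 0
--         top    = r > 0        and maze[r-1][c] != WALL
--         right  = c < cols - 1 and maze[r][c+1] != WALL
--         bottom = r < rows - 1 and maze[r+1][c] != WALL
--         left   = c > 0        and maze[r][c-1] != WALL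
--         if 0 < r < rows - 1 and 0 < c < cols - 1 and not (top or right or bottom or left):
--             return 15
--         return (1 if top else 0) | (2 if right else 0) | (4 if bottom else 0) | (8 if left else 0)
--     return [[cell(r, c) for c in range(cols)] for r in range(rows)]
-- ===== Notes on version B (the rewrite author's own statement) =====
-- stated objective: alternative
-- what changed: Replaced A's scatter (each non-wall cell ORs bits into its wall neighbours, plus a special 15 assignment) by a per-cell gather that computes each cell's mask directly from its own four neighbours, with no cross-cell accumulation.
import Mathlib
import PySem

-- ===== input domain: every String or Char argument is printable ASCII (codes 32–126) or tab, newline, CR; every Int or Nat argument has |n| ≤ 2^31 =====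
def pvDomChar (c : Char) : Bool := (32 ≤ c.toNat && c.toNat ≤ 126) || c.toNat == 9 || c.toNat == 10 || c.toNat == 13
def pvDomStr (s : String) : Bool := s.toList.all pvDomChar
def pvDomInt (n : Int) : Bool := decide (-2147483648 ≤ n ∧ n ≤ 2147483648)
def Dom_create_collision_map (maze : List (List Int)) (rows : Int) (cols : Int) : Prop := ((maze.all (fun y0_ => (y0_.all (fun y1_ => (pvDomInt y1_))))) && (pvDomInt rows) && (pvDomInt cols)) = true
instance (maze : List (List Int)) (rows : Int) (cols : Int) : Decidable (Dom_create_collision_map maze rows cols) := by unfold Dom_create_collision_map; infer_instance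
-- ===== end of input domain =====

-- B replaces A's scatter of OR-bits into neighbouring wall cells by a direct per-cell
-- gather of each cell's own mask (objective: alternative decomposition, same cost).

-- ===== PORT A =====
def pvWALL : Int := 1

-- maze[i][j] / cmap[i][j]; exact on in-range indices (Pre_ guarantees every executed access is in range)
def pvGet2 (m : List (List Int)) (i j : Int) : Int :=
  PySem.List.pyGetD (PySem.List.pyGetD m i ([] : List Int)) j 0

-- cmap[i][j] |= v  (indices are always ≥ 0 and in range when executed)
def pvOrAt (g : List (List Int)) (i j : Int) (v : Int) : List (List Int) :=
  g.modify i.toNat (fun rw => rw.modify j.toNat (fun x => Int.lor x v))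

-- cmap[i][j] = v
def pvSetAt (g : List (List Int)) (i j : Int) (v : Int) : List (List Int) :=
  g.modify i.toNat (fun rw => rw.modify j.toNat (fun _ => v))

-- the body of A's inner loop, for cell (row, col)
def pvStepA (maze : List (List Int)) (rows cols : Int) (cmap : List (List Int))
    (row col : Int) : List (List Int) :=
  let b := decide (row < rows-1) && decide (pvGet2 maze (row+1) col = pvWALL)
  let l := decide (0 < col)      && decide (pvGet2 maze row (col-1) = pvWALL)
  let t := decide (0 < row)      && decide (pvGet2 maze (row-1) col = pvWALL)
  let r := decide (col < cols-1) && decide (pvGet2 maze row (col+1) = pvWALL)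
  if pvGet2 maze row col = pvWALL then
    (if b && l && t && r then pvSetAt cmap row col 15 else cmap)
  else
    let c1 := if b then pvOrAt cmap (row+1) col 1 else cmap
    let c2 := if l then pvOrAt c1 row (col-1) 2 else c1
    let c3 := if t then pvOrAt c2 (row-1) col 4 else c2
    if r then pvOrAt c3 row (col+1) 8 else c3

def create_collision_map (maze : List (List Int)) (rows : Int) (cols : Int) : List (List Int) :=
  let cmap := (PySem.List.pyRange 0 rows 1).map
    (fun _ => (PySem.List.pyRange 0 cols 1).map (fun _ => (0 : Int)))
  (PySem.List.pyRange 0 rows 1).foldl (fun cmap row =>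
    (PySem.List.pyRange 0 cols 1).foldl (fun cmap col =>
      pvStepA maze rows cols cmap row col) cmap) cmap

-- ===== PORT B =====
def pvMask (maze : List (List Int)) (rows cols r c : Int) : Int :=
  if pvGet2 maze r c ≠ pvWALL then 0
  else
    let top := decide (0 < r)      && decide (pvGet2 maze (r-1) c ≠ pvWALL)
    let rgt := decide (c < cols-1) && decide (pvGet2 maze r (c+1) ≠ pvWALL)
    let bot := decide (r < rows-1) && decide (pvGet2 maze (r+1) c ≠ pvWALL)
    let lft := decide (0 < c)      && decide (pvGet2 maze r (c-1) ≠ pvWALL)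
    if 0 < r ∧ r < rows-1 ∧ 0 < c ∧ c < cols-1 ∧ !(top || rgt || bot || lft) then 15
    else
      Int.lor (Int.lor (Int.lor (if top then (1:Int) else 0) (if rgt then 2 else 0))
        (if bot then 4 else 0)) (if lft then 8 else 0)

def create_collision_map_alt (maze : List (List Int)) (rows : Int) (cols : Int) : List (List Int) :=
  (PySem.List.pyRange 0 rows 1).map (fun r =>
    (PySem.List.pyRange 0 cols 1).map (fun c => pvMask maze rows cols r c))

-- ===== PRECONDITION & SPEC =====
-- Pre_ excludes exactly the inputs on which Python A raises IndexError: a positive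
-- rows×cols grid whose maze has fewer than rows rows, or one of its first rows rows
-- shorter than cols.
def Pre_create_collision_map (maze : List (List Int)) (rows : Int) (cols : Int) : Prop :=
  rows ≤ 0 ∨ cols ≤ 0 ∨
    (rows ≤ (maze.length : Int) ∧ ∀ l ∈ maze.take rows.toNat, cols ≤ (l.length : Int))
instance (maze : List (List Int)) (rows : Int) (cols : Int) : Decidable (Pre_create_collision_map maze rows cols) := by unfold Pre_create_collision_map; infer_instance

def pvWitness_create_collision_map : List (List Int) × Int × Int := ([[1, 1], [1, 0]], 2, 2)

def Spec_create_collision_map (maze : List (List Int)) (rows : Int) (cols : Int) (out : List (List Int)) : Prop := out = create_collision_map_alt maze rows cols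
instance (maze : List (List Int)) (rows : Int) (cols : Int) (out : List (List Int)) : Decidable (Spec_create_collision_map maze rows cols out) := by unfold Spec_create_collision_map; infer_instance

-- ===== CLAIM (what is proved, stated in full; the proofs are below) =====
def Claim_equal_create_collision_map : Prop := ∀ (maze : List (List Int)) (rows : Int) (cols : Int), Dom_create_collision_map maze rows cols → Pre_create_collision_map maze rows cols → Spec_create_collision_map maze rows cols (create_collision_map maze rows cols)

-- ===== LEMMAS AND PROOFS =====

-- value of cell (r, c) of a grid (0 when out of range)
def pvVal (g : List (List Int)) (r c : Int) : Int :=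
  ((g[r.toNat]?).getD [])[c.toNat]?.getD 0

-- grid has exactly rows × cols shape
def pvShape (rows cols : Int) (g : List (List Int)) : Prop :=
  g.length = rows.toNat ∧ ∀ rw ∈ g, rw.length = cols.toNat

-- scalar effect of A's step at source s on the single cell (r, c)
def pvEff (maze : List (List Int)) (rows cols r c : Int) (s : Int × Int) (a : Int) : Int :=
  let row := s.1
  let col := s.2
  let b := decide (row < rows-1) && decide (pvGet2 maze (row+1) col = pvWALL)
  let l := decide (0 < col)      && decide (pvGet2 maze row (col-1) = pvWALL)
  let t := decide (0 < row)      && decide (pvGet2 maze (row-1) col = pvWALL)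
  let r' := decide (col < cols-1) && decide (pvGet2 maze row (col+1) = pvWALL)
  if pvGet2 maze row col = pvWALL then
    (if (b && l && t && r') = true ∧ row = r ∧ col = c then 15 else a)
  else
    let a1 := if b = true ∧ row + 1 = r ∧ col = c then Int.lor a 1 else a
    let a2 := if l = true ∧ row = r ∧ col - 1 = c then Int.lor a1 2 else a1
    let a3 := if t = true ∧ row - 1 = r ∧ col = c then Int.lor a2 4 else a2
    if r' = true ∧ row = r ∧ col + 1 = c then Int.lor a3 8 else a3

-- the scalar effect of each of the five sources that can touch (r, c)
def pvETop (maze : List (List Int)) (rows cols r c a : Int) : Int :=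
  if 0 < r ∧ pvGet2 maze r c = pvWALL ∧ pvGet2 maze (r-1) c ≠ pvWALL then Int.lor a 1 else a
def pvELft (maze : List (List Int)) (rows cols r c a : Int) : Int :=
  if 0 < c ∧ pvGet2 maze r c = pvWALL ∧ pvGet2 maze r (c-1) ≠ pvWALL then Int.lor a 8 else a
def pvERgt (maze : List (List Int)) (rows cols r c a : Int) : Int :=
  if c < cols - 1 ∧ pvGet2 maze r c = pvWALL ∧ pvGet2 maze r (c+1) ≠ pvWALL then Int.lor a 2 else a
def pvEBot (maze : List (List Int)) (rows cols r c a : Int) : Int :=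
  if r < rows - 1 ∧ pvGet2 maze r c = pvWALL ∧ pvGet2 maze (r+1) c ≠ pvWALL then Int.lor a 4 else a
def pvEMid (maze : List (List Int)) (rows cols r c a : Int) : Int :=
  if pvGet2 maze r c = pvWALL ∧ 0 < r ∧ r < rows-1 ∧ 0 < c ∧ c < cols-1 ∧
      pvGet2 maze (r+1) c = pvWALL ∧ pvGet2 maze r (c-1) = pvWALL ∧
      pvGet2 maze (r-1) c = pvWALL ∧ pvGet2 maze r (c+1) = pvWALL
    then 15 else a

theorem pvShape_modify (rows cols : Int) (g : List (List Int)) (i j : Nat) (f : Int → Int)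
    (hg : pvShape rows cols g) :
    pvShape rows cols (g.modify i (fun rw => rw.modify j f)) := by
  obtain ⟨h1, h2⟩ := hg
  refine ⟨by rw [List.length_modify]; exact h1, ?_⟩
  intro rw hrw
  obtain ⟨n, hn, hget⟩ := List.getElem_of_mem hrw
  have hn' : n < g.length := by rwa [List.length_modify] at hn
  have hthis : (g.modify i fun rw => rw.modify j f)[n]? = some rw := by
    rw [List.getElem?_eq_getElem hn, hget]
  rw [List.getElem?_modify, List.getElem?_eq_getElem hn'] at hthis
  simp at hthis
  by_cases hni : i = n
  · subst hni
    rw [if_pos rfl] at hthis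
    rw [← hthis]
    rw [List.length_modify]
    exact h2 _ (List.getElem_mem hn')
  · simp only [if_neg hni] at hthis
    rw [← hthis]
    exact h2 _ (List.getElem_mem hn')

theorem pvShape_orAt (rows cols : Int) (g : List (List Int)) (i j v : Int)
    (hg : pvShape rows cols g) : pvShape rows cols (pvOrAt g i j v) :=
  pvShape_modify rows cols g i.toNat j.toNat _ hg

theorem pvShape_setAt (rows cols : Int) (g : List (List Int)) (i j v : Int)
    (hg : pvShape rows cols g) : pvShape rows cols (pvSetAt g i j v) :=
  pvShape_modify rows cols g i.toNat j.toNat _ hg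

theorem pvVal_modify (g : List (List Int)) (i j : Int) (f : Int → Int) (r c : Int)
    (rows cols : Int) (hg : pvShape rows cols g)
    (hi : 0 ≤ i) (hi2 : i < rows) (hj : 0 ≤ j) (hj2 : j < cols)
    (hr : 0 ≤ r) (hr2 : r < rows) (hc : 0 ≤ c) (hc2 : c < cols) :
    pvVal (g.modify i.toNat (fun rw => rw.modify j.toNat f)) r c
      = if i = r ∧ j = c then f (pvVal g r c) else pvVal g r c := by
  obtain ⟨h1, h2⟩ := hg
  have hrn : r.toNat < g.length := by rw [h1]; omega
  have hset : g[r.toNat]? = some g[r.toNat] := List.getElem?_eq_getElem hrn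
  have hrl : (g[r.toNat]).length = cols.toNat := h2 _ (List.getElem_mem hrn)
  have hcn : c.toNat < (g[r.toNat]).length := by rw [hrl]; omega
  have hcset : (g[r.toNat])[c.toNat]? = some (g[r.toNat])[c.toNat] :=
    List.getElem?_eq_getElem hcn
  by_cases hir : i = r
  · subst hir
    by_cases hjc : j = c
    · subst hjc
      simp [pvVal, List.getElem?_modify, hset, hcset]
    · have e2 : j.toNat ≠ c.toNat := by omega
      simp [pvVal, List.getElem?_modify, hset, hcset, e2, hjc]
  · have e : i.toNat ≠ r.toNat := by omega
    simp [pvVal, List.getElem?_modify, hset, hcset, e, hir]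

theorem pvShape_condOr (rows cols : Int) (g : List (List Int)) (cond : Bool) (i j v : Int)
    (hg : pvShape rows cols g) :
    pvShape rows cols (if cond then pvOrAt g i j v else g) := by
  cases cond
  · simpa using hg
  · simpa using pvShape_orAt rows cols g i j v hg

theorem pvVal_condOr (rows cols : Int) (g : List (List Int)) (cond : Bool) (i j v r c : Int)
    (hg : pvShape rows cols g)
    (hb : cond = true → 0 ≤ i ∧ i < rows ∧ 0 ≤ j ∧ j < cols)
    (hr : 0 ≤ r) (hr2 : r < rows) (hc : 0 ≤ c) (hc2 : c < cols) :
    pvVal (if cond then pvOrAt g i j v else g) r c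
      = if cond = true ∧ i = r ∧ j = c then Int.lor (pvVal g r c) v else pvVal g r c := by
  cases cond
  · simp
  · obtain ⟨h1, h2, h3, h4⟩ := hb rfl
    simp only [if_true, true_and]
    unfold pvOrAt
    rw [pvVal_modify g i j _ r c rows cols ⟨hg.1, hg.2⟩ h1 h2 h3 h4 hr hr2 hc hc2]

theorem pvVal_stepA (maze : List (List Int)) (rows cols : Int) (g : List (List Int))
    (row col r c : Int) (hg : pvShape rows cols g)
    (hrow : 0 ≤ row) (hrow2 : row < rows) (hcol : 0 ≤ col) (hcol2 : col < cols)
    (hr : 0 ≤ r) (hr2 : r < rows) (hc : 0 ≤ c) (hc2 : c < cols) :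
    pvVal (pvStepA maze rows cols g row col) r c
      = pvEff maze rows cols r c (row, col) (pvVal g r c) := by
  unfold pvStepA pvEff
  dsimp only
  generalize hB : (decide (row < rows-1) && decide (pvGet2 maze (row+1) col = pvWALL)) = B
  generalize hL : (decide (0 < col) && decide (pvGet2 maze row (col-1) = pvWALL)) = L
  generalize hT : (decide (0 < row) && decide (pvGet2 maze (row-1) col = pvWALL)) = T
  generalize hR : (decide (col < cols-1) && decide (pvGet2 maze row (col+1) = pvWALL)) = R
  by_cases hw : pvGet2 maze row col = pvWALL
  · rw [if_pos hw, if_pos hw]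
    by_cases h15 : (B && L && T && R) = true
    · rw [if_pos h15]
      unfold pvSetAt
      rw [pvVal_modify g row col (fun _ => 15) r c rows cols hg hrow hrow2 hcol hcol2 hr hr2 hc hc2]
      by_cases hco : row = r ∧ col = c
      · rw [if_pos hco, if_pos ⟨h15, hco.1, hco.2⟩]
      · rw [if_neg hco, if_neg (fun h => hco ⟨h.2.1, h.2.2⟩)]
    · rw [if_neg (by simpa using h15), if_neg (fun h => h15 h.1)]
  · rw [if_neg hw, if_neg hw]
    have s1 : pvShape rows cols (if B then pvOrAt g (row+1) col 1 else g) :=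
      pvShape_condOr rows cols g B (row+1) col 1 hg
    have s2 : pvShape rows cols (if L then pvOrAt (if B then pvOrAt g (row+1) col 1 else g) row (col-1) 2 else (if B then pvOrAt g (row+1) col 1 else g)) :=
      pvShape_condOr rows cols _ L row (col-1) 2 s1
    have s3 : pvShape rows cols (if T then pvOrAt (if L then pvOrAt (if B then pvOrAt g (row+1) col 1 else g) row (col-1) 2 else (if B then pvOrAt g (row+1) col 1 else g)) (row-1) col 4 else (if L then pvOrAt (if B then pvOrAt g (row+1) col 1 else g) row (col-1) 2 else (if B then pvOrAt g (row+1) col 1 else g))) :=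
      pvShape_condOr rows cols _ T (row-1) col 4 s2
    have db : B = true → 0 ≤ row + 1 ∧ row + 1 < rows ∧ 0 ≤ col ∧ col < cols := by
      intro h
      have h' := hB.trans h
      simp only [Bool.and_eq_true, decide_eq_true_eq] at h'
      exact ⟨by omega, by omega, hcol, hcol2⟩
    have dl : L = true → 0 ≤ row ∧ row < rows ∧ 0 ≤ col - 1 ∧ col - 1 < cols := by
      intro h
      have h' := hL.trans h
      simp only [Bool.and_eq_true, decide_eq_true_eq] at h'
      exact ⟨hrow, hrow2, by omega, by omega⟩
    have dt : T = true → 0 ≤ row - 1 ∧ row - 1 < rows ∧ 0 ≤ col ∧ col < cols := by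
      intro h
      have h' := hT.trans h
      simp only [Bool.and_eq_true, decide_eq_true_eq] at h'
      exact ⟨by omega, by omega, hcol, hcol2⟩
    have dr : R = true → 0 ≤ row ∧ row < rows ∧ 0 ≤ col + 1 ∧ col + 1 < cols := by
      intro h
      have h' := hR.trans h
      simp only [Bool.and_eq_true, decide_eq_true_eq] at h'
      exact ⟨hrow, hrow2, by omega, by omega⟩
    rw [pvVal_condOr rows cols _ R row (col+1) 8 r c s3 dr hr hr2 hc hc2,
        pvVal_condOr rows cols _ T (row-1) col 4 r c s2 dt hr hr2 hc hc2,
        pvVal_condOr rows cols _ L row (col-1) 2 r c s1 dl hr hr2 hc hc2,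
        pvVal_condOr rows cols _ B (row+1) col 1 r c hg db hr hr2 hc hc2]

theorem pvShape_stepA (maze : List (List Int)) (rows cols : Int) (g : List (List Int))
    (row col : Int) (hg : pvShape rows cols g) :
    pvShape rows cols (pvStepA maze rows cols g row col) := by
  unfold pvStepA
  dsimp only
  split_ifs <;>
    (repeat first
      | exact hg
      | exact pvShape_setAt rows cols g row col 15 hg
      | apply pvShape_orAt)

theorem pvVal_fold (maze : List (List Int)) (rows cols : Int) (L : List (Int × Int))
    (g : List (List Int)) (r c : Int) (hg : pvShape rows cols g)
    (hL : ∀ s ∈ L, 0 ≤ s.1 ∧ s.1 < rows ∧ 0 ≤ s.2 ∧ s.2 < cols)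
    (hr : 0 ≤ r) (hr2 : r < rows) (hc : 0 ≤ c) (hc2 : c < cols) :
    pvVal (L.foldl (fun g s => pvStepA maze rows cols g s.1 s.2) g) r c
      = L.foldl (fun a s => pvEff maze rows cols r c s a) (pvVal g r c) := by
  induction L generalizing g with
  | nil => rfl
  | cons s L ih =>
    simp only [List.foldl_cons]
    obtain ⟨k1, k2, k3, k4⟩ := hL s List.mem_cons_self
    rw [ih _ (pvShape_stepA _ _ _ _ _ _ hg) (fun x hx => hL x (List.mem_cons_of_mem _ hx))]
    rw [show pvStepA maze rows cols g s.1 s.2 = pvStepA maze rows cols g (s.1, s.2).1 (s.1, s.2).2 from rfl,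
        pvVal_stepA maze rows cols g s.1 s.2 r c hg k1 k2 k3 k4 hr hr2 hc hc2]

theorem pvShape_fold (maze : List (List Int)) (rows cols : Int) (L : List (Int × Int))
    (g : List (List Int)) (hg : pvShape rows cols g) :
    pvShape rows cols (L.foldl (fun g s => pvStepA maze rows cols g s.1 s.2) g) := by
  induction L generalizing g with
  | nil => exact hg
  | cons s L ih => exact ih _ (pvShape_stepA _ _ _ _ _ _ hg)

-- generic 1-D fold lemmas
theorem pvFoldl_id (L : List Int) (f : Int → Int → Int) (a : Int)
    (h : ∀ x ∈ L, ∀ b, f b x = b) : L.foldl f a = a := by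
  induction L generalizing a with
  | nil => rfl
  | cons x L ih =>
    simp only [List.foldl_cons, h x List.mem_cons_self]
    exact ih _ (fun y hy b => h y (List.mem_cons_of_mem _ hy) b)

theorem pvFoldl_single (lo n v : Int) (f : Int → Int → Int) (a : Int)
    (h1 : lo ≤ v) (h2 : v < n)
    (hid : ∀ x, lo ≤ x → x < n → x ≠ v → ∀ b, f b x = b) :
    (PySem.List.pyRange lo n 1).foldl f a = f a v := by
  rw [PySem.List.pyRange_one_append lo v n h1 (by omega), List.foldl_append,
    PySem.List.pyRange_one_cons (show v < n from h2), List.foldl_cons]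
  rw [pvFoldl_id _ f a (fun x hx b => by
    rw [PySem.List.mem_pyRange_one] at hx
    exact hid x hx.1 (by omega) (by omega) b)]
  exact pvFoldl_id _ f _ (fun x hx b => by
    rw [PySem.List.mem_pyRange_one] at hx
    exact hid x (by omega) hx.2 (by omega) b)

-- pvEff is the identity for sources that do not touch (r, c)
theorem pvEff_id (maze : List (List Int)) (rows cols r c row col : Int)
    (h1 : ¬(row + 1 = r ∧ col = c)) (h2 : ¬(row = r ∧ col - 1 = c))
    (h3 : ¬(row - 1 = r ∧ col = c)) (h4 : ¬(row = r ∧ col + 1 = c))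
    (h5 : ¬(row = r ∧ col = c)) (a : Int) :
    pvEff maze rows cols r c (row, col) a = a := by
  unfold pvEff
  dsimp only
  by_cases hw : pvGet2 maze row col = pvWALL
  · rw [if_pos hw, if_neg (fun h => h5 ⟨h.2.1, h.2.2⟩)]
  · rw [if_neg hw, if_neg (fun h => h4 ⟨h.2.1, h.2.2⟩), if_neg (fun h => h3 ⟨h.2.1, h.2.2⟩),
        if_neg (fun h => h2 ⟨h.2.1, h.2.2⟩), if_neg (fun h => h1 ⟨h.2.1, h.2.2⟩)]

theorem pvEff_top (maze : List (List Int)) (rows cols r c : Int)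
    (hr : 0 < r) (hr2 : r < rows) (a : Int) :
    pvEff maze rows cols r c (r - 1, c) a
      = if pvGet2 maze r c = pvWALL ∧ pvGet2 maze (r-1) c ≠ pvWALL then Int.lor a 1 else a := by
  unfold pvEff
  dsimp only
  rw [show r - 1 + 1 = r from by omega]
  by_cases hs : pvGet2 maze (r - 1) c = pvWALL
  · rw [if_pos hs, if_neg (fun h => absurd h.2.1 (by omega)),
        if_neg (show ¬(pvGet2 maze r c = pvWALL ∧ pvGet2 maze (r-1) c ≠ pvWALL) from fun h => h.2 hs)]
  · rw [if_neg hs]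
    by_cases hT : pvGet2 maze r c = pvWALL
    · rw [if_pos (show (decide (r - 1 < rows - 1) && decide (pvGet2 maze r c = pvWALL)) = true ∧ r = r ∧ c = c from
            ⟨by simp only [Bool.and_eq_true, decide_eq_true_eq]; exact ⟨by omega, hT⟩, rfl, rfl⟩),
          if_neg (show ¬((decide (0 < c) && decide (pvGet2 maze (r-1) (c-1) = pvWALL)) = true ∧ r - 1 = r ∧ c - 1 = c) from fun h => absurd h.2.1 (by omega)),
          if_neg (show ¬((decide (0 < r - 1) && decide (pvGet2 maze (r-1-1) c = pvWALL)) = true ∧ r - 1 - 1 = r ∧ c = c) from fun h => absurd h.2.1 (by omega)),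
          if_neg (show ¬((decide (c < cols - 1) && decide (pvGet2 maze (r-1) (c+1) = pvWALL)) = true ∧ r - 1 = r ∧ c + 1 = c) from fun h => absurd h.2.1 (by omega)),
          if_pos (show pvGet2 maze r c = pvWALL ∧ pvGet2 maze (r-1) c ≠ pvWALL from ⟨hT, hs⟩)]
    · rw [if_neg (show ¬((decide (r - 1 < rows - 1) && decide (pvGet2 maze r c = pvWALL)) = true ∧ r = r ∧ c = c) from
            fun h => hT (by have h1 := h.1; simp only [Bool.and_eq_true, decide_eq_true_eq] at h1; exact h1.2)),
          if_neg (show ¬((decide (0 < c) && decide (pvGet2 maze (r-1) (c-1) = pvWALL)) = true ∧ r - 1 = r ∧ c - 1 = c) from fun h => absurd h.2.1 (by omega)),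
          if_neg (show ¬((decide (0 < r - 1) && decide (pvGet2 maze (r-1-1) c = pvWALL)) = true ∧ r - 1 - 1 = r ∧ c = c) from fun h => absurd h.2.1 (by omega)),
          if_neg (show ¬((decide (c < cols - 1) && decide (pvGet2 maze (r-1) (c+1) = pvWALL)) = true ∧ r - 1 = r ∧ c + 1 = c) from fun h => absurd h.2.1 (by omega)),
          if_neg (show ¬(pvGet2 maze r c = pvWALL ∧ pvGet2 maze (r-1) c ≠ pvWALL) from fun h => hT h.1)]

theorem pvEff_left (maze : List (List Int)) (rows cols r c : Int)
    (hc : 0 < c) (hc2 : c < cols) (a : Int) :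
    pvEff maze rows cols r c (r, c - 1) a
      = if pvGet2 maze r c = pvWALL ∧ pvGet2 maze r (c-1) ≠ pvWALL then Int.lor a 8 else a := by
  unfold pvEff
  dsimp only
  rw [show c - 1 + 1 = c from by omega]
  by_cases hs : pvGet2 maze r (c - 1) = pvWALL
  · rw [if_pos hs, if_neg (fun h => absurd h.2.2 (by omega)),
        if_neg (show ¬(pvGet2 maze r c = pvWALL ∧ pvGet2 maze r (c-1) ≠ pvWALL) from fun h => h.2 hs)]
  · rw [if_neg hs]
    by_cases hT : pvGet2 maze r c = pvWALL
    · rw [if_neg (show ¬((decide (r < rows - 1) && decide (pvGet2 maze (r+1) (c-1) = pvWALL)) = true ∧ r + 1 = r ∧ c - 1 = c) from fun h => absurd h.2.1 (by omega)),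
          if_neg (show ¬((decide (0 < c - 1) && decide (pvGet2 maze r (c-1-1) = pvWALL)) = true ∧ r = r ∧ c - 1 - 1 = c) from fun h => absurd h.2.2 (by omega)),
          if_neg (show ¬((decide (0 < r) && decide (pvGet2 maze (r-1) (c-1) = pvWALL)) = true ∧ r - 1 = r ∧ c - 1 = c) from fun h => absurd h.2.1 (by omega)),
          if_pos (show (decide (c - 1 < cols - 1) && decide (pvGet2 maze r c = pvWALL)) = true ∧ r = r ∧ c = c from
            ⟨by simp only [Bool.and_eq_true, decide_eq_true_eq]; exact ⟨by omega, hT⟩, rfl, rfl⟩),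
          if_pos (show pvGet2 maze r c = pvWALL ∧ pvGet2 maze r (c-1) ≠ pvWALL from ⟨hT, hs⟩)]
    · rw [if_neg (show ¬((decide (r < rows - 1) && decide (pvGet2 maze (r+1) (c-1) = pvWALL)) = true ∧ r + 1 = r ∧ c - 1 = c) from fun h => absurd h.2.1 (by omega)),
          if_neg (show ¬((decide (0 < c - 1) && decide (pvGet2 maze r (c-1-1) = pvWALL)) = true ∧ r = r ∧ c - 1 - 1 = c) from fun h => absurd h.2.2 (by omega)),
          if_neg (show ¬((decide (0 < r) && decide (pvGet2 maze (r-1) (c-1) = pvWALL)) = true ∧ r - 1 = r ∧ c - 1 = c) from fun h => absurd h.2.1 (by omega)),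
          if_neg (show ¬((decide (c - 1 < cols - 1) && decide (pvGet2 maze r c = pvWALL)) = true ∧ r = r ∧ c = c) from
            fun h => hT (by have h1 := h.1; simp only [Bool.and_eq_true, decide_eq_true_eq] at h1; exact h1.2)),
          if_neg (show ¬(pvGet2 maze r c = pvWALL ∧ pvGet2 maze r (c-1) ≠ pvWALL) from fun h => hT h.1)]

theorem pvEff_right (maze : List (List Int)) (rows cols r c : Int)
    (hc : 0 ≤ c) (hc2 : c + 1 < cols) (a : Int) :
    pvEff maze rows cols r c (r, c + 1) a
      = if pvGet2 maze r c = pvWALL ∧ pvGet2 maze r (c+1) ≠ pvWALL then Int.lor a 2 else a := by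
  unfold pvEff
  dsimp only
  rw [show c + 1 - 1 = c from by omega]
  by_cases hs : pvGet2 maze r (c + 1) = pvWALL
  · rw [if_pos hs, if_neg (fun h => absurd h.2.2 (by omega)),
        if_neg (show ¬(pvGet2 maze r c = pvWALL ∧ pvGet2 maze r (c+1) ≠ pvWALL) from fun h => h.2 hs)]
  · rw [if_neg hs]
    by_cases hT : pvGet2 maze r c = pvWALL
    · rw [if_neg (show ¬((decide (r < rows - 1) && decide (pvGet2 maze (r+1) (c+1) = pvWALL)) = true ∧ r + 1 = r ∧ c + 1 = c) from fun h => absurd h.2.1 (by omega)),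
          if_pos (show (decide (0 < c + 1) && decide (pvGet2 maze r c = pvWALL)) = true ∧ r = r ∧ c = c from
            ⟨by simp only [Bool.and_eq_true, decide_eq_true_eq]; exact ⟨by omega, hT⟩, rfl, rfl⟩),
          if_neg (show ¬((decide (0 < r) && decide (pvGet2 maze (r-1) (c+1) = pvWALL)) = true ∧ r - 1 = r ∧ c + 1 = c) from fun h => absurd h.2.1 (by omega)),
          if_neg (show ¬((decide (c + 1 < cols - 1) && decide (pvGet2 maze r (c+1+1) = pvWALL)) = true ∧ r = r ∧ c + 1 + 1 = c) from fun h => absurd h.2.2 (by omega)),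
          if_pos (show pvGet2 maze r c = pvWALL ∧ pvGet2 maze r (c+1) ≠ pvWALL from ⟨hT, hs⟩)]
    · rw [if_neg (show ¬((decide (r < rows - 1) && decide (pvGet2 maze (r+1) (c+1) = pvWALL)) = true ∧ r + 1 = r ∧ c + 1 = c) from fun h => absurd h.2.1 (by omega)),
          if_neg (show ¬((decide (0 < c + 1) && decide (pvGet2 maze r c = pvWALL)) = true ∧ r = r ∧ c = c) from
            fun h => hT (by have h1 := h.1; simp only [Bool.and_eq_true, decide_eq_true_eq] at h1; exact h1.2)),
          if_neg (show ¬((decide (0 < r) && decide (pvGet2 maze (r-1) (c+1) = pvWALL)) = true ∧ r - 1 = r ∧ c + 1 = c) from fun h => absurd h.2.1 (by omega)),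
          if_neg (show ¬((decide (c + 1 < cols - 1) && decide (pvGet2 maze r (c+1+1) = pvWALL)) = true ∧ r = r ∧ c + 1 + 1 = c) from fun h => absurd h.2.2 (by omega)),
          if_neg (show ¬(pvGet2 maze r c = pvWALL ∧ pvGet2 maze r (c+1) ≠ pvWALL) from fun h => hT h.1)]

theorem pvEff_bot (maze : List (List Int)) (rows cols r c : Int)
    (hr : 0 ≤ r) (hr2 : r + 1 < rows) (a : Int) :
    pvEff maze rows cols r c (r + 1, c) a
      = if pvGet2 maze r c = pvWALL ∧ pvGet2 maze (r+1) c ≠ pvWALL then Int.lor a 4 else a := by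
  unfold pvEff
  dsimp only
  rw [show r + 1 - 1 = r from by omega]
  by_cases hs : pvGet2 maze (r + 1) c = pvWALL
  · rw [if_pos hs, if_neg (fun h => absurd h.2.1 (by omega)),
        if_neg (show ¬(pvGet2 maze r c = pvWALL ∧ pvGet2 maze (r+1) c ≠ pvWALL) from fun h => h.2 hs)]
  · rw [if_neg hs]
    by_cases hT : pvGet2 maze r c = pvWALL
    · rw [if_neg (show ¬((decide (r + 1 < rows - 1) && decide (pvGet2 maze (r+1+1) c = pvWALL)) = true ∧ r + 1 + 1 = r ∧ c = c) from fun h => absurd h.2.1 (by omega)),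
          if_neg (show ¬((decide (0 < c) && decide (pvGet2 maze (r+1) (c-1) = pvWALL)) = true ∧ r + 1 = r ∧ c - 1 = c) from fun h => absurd h.2.1 (by omega)),
          if_pos (show (decide (0 < r + 1) && decide (pvGet2 maze r c = pvWALL)) = true ∧ r = r ∧ c = c from
            ⟨by simp only [Bool.and_eq_true, decide_eq_true_eq]; exact ⟨by omega, hT⟩, rfl, rfl⟩),
          if_neg (show ¬((decide (c < cols - 1) && decide (pvGet2 maze (r+1) (c+1) = pvWALL)) = true ∧ r + 1 = r ∧ c + 1 = c) from fun h => absurd h.2.1 (by omega)),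
          if_pos (show pvGet2 maze r c = pvWALL ∧ pvGet2 maze (r+1) c ≠ pvWALL from ⟨hT, hs⟩)]
    · rw [if_neg (show ¬((decide (r + 1 < rows - 1) && decide (pvGet2 maze (r+1+1) c = pvWALL)) = true ∧ r + 1 + 1 = r ∧ c = c) from fun h => absurd h.2.1 (by omega)),
          if_neg (show ¬((decide (0 < c) && decide (pvGet2 maze (r+1) (c-1) = pvWALL)) = true ∧ r + 1 = r ∧ c - 1 = c) from fun h => absurd h.2.1 (by omega)),
          if_neg (show ¬((decide (0 < r + 1) && decide (pvGet2 maze r c = pvWALL)) = true ∧ r = r ∧ c = c) from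
            fun h => hT (by have h1 := h.1; simp only [Bool.and_eq_true, decide_eq_true_eq] at h1; exact h1.2)),
          if_neg (show ¬((decide (c < cols - 1) && decide (pvGet2 maze (r+1) (c+1) = pvWALL)) = true ∧ r + 1 = r ∧ c + 1 = c) from fun h => absurd h.2.1 (by omega)),
          if_neg (show ¬(pvGet2 maze r c = pvWALL ∧ pvGet2 maze (r+1) c ≠ pvWALL) from fun h => hT h.1)]

theorem pvEff_mid (maze : List (List Int)) (rows cols r c : Int) (a : Int) :
    pvEff maze rows cols r c (r, c) a = pvEMid maze rows cols r c a := by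
  unfold pvEff pvEMid
  dsimp only
  by_cases hw : pvGet2 maze r c = pvWALL
  · rw [if_pos hw]
    by_cases hB : (((decide (r < rows - 1) && decide (pvGet2 maze (r+1) c = pvWALL)) &&
          (decide (0 < c) && decide (pvGet2 maze r (c-1) = pvWALL))) &&
          (decide (0 < r) && decide (pvGet2 maze (r-1) c = pvWALL)) &&
          (decide (c < cols - 1) && decide (pvGet2 maze r (c+1) = pvWALL))) = true
    · have hB' := hB
      simp only [Bool.and_eq_true, decide_eq_true_eq] at hB'
      obtain ⟨⟨⟨⟨a1, a2⟩, b1, b2⟩, c1, c2⟩, d1, d2⟩ := hB'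
      rw [if_pos ⟨hB, rfl, rfl⟩, if_pos ⟨hw, c1, a1, b1, d1, a2, b2, c2, d2⟩]
    · rw [if_neg (fun h => hB h.1),
          if_neg (show ¬(pvGet2 maze r c = pvWALL ∧ 0 < r ∧ r < rows-1 ∧ 0 < c ∧ c < cols-1 ∧
              pvGet2 maze (r+1) c = pvWALL ∧ pvGet2 maze r (c-1) = pvWALL ∧
              pvGet2 maze (r-1) c = pvWALL ∧ pvGet2 maze r (c+1) = pvWALL) from fun h => hB (by
            simp only [Bool.and_eq_true, decide_eq_true_eq]
            exact ⟨⟨⟨⟨h.2.2.1, h.2.2.2.2.2.1⟩, h.2.2.2.1, h.2.2.2.2.2.2.1⟩, h.2.1,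
              h.2.2.2.2.2.2.2.1⟩, h.2.2.2.2.1, h.2.2.2.2.2.2.2.2⟩))]
  · rw [if_neg hw,
        if_neg (show ¬((decide (r < rows - 1) && decide (pvGet2 maze (r+1) c = pvWALL)) = true ∧ r + 1 = r ∧ c = c) from fun h => absurd h.2.1 (by omega)),
        if_neg (show ¬((decide (0 < c) && decide (pvGet2 maze r (c-1) = pvWALL)) = true ∧ r = r ∧ c - 1 = c) from fun h => absurd h.2.2 (by omega)),
        if_neg (show ¬((decide (0 < r) && decide (pvGet2 maze (r-1) c = pvWALL)) = true ∧ r - 1 = r ∧ c = c) from fun h => absurd h.2.1 (by omega)),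
        if_neg (show ¬((decide (c < cols - 1) && decide (pvGet2 maze r (c+1) = pvWALL)) = true ∧ r = r ∧ c + 1 = c) from fun h => absurd h.2.2 (by omega)),
        if_neg (show ¬(pvGet2 maze r c = pvWALL ∧ 0 < r ∧ r < rows-1 ∧ 0 < c ∧ c < cols-1 ∧
            pvGet2 maze (r+1) c = pvWALL ∧ pvGet2 maze r (c-1) = pvWALL ∧
            pvGet2 maze (r-1) c = pvWALL ∧ pvGet2 maze r (c+1) = pvWALL) from fun h => hw h.1)]

-- combining the five scalar effects yields B's mask
theorem pvCombine (maze : List (List Int)) (rows cols r c : Int) :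
    pvEBot maze rows cols r c (pvERgt maze rows cols r c (pvEMid maze rows cols r c
      (pvELft maze rows cols r c (pvETop maze rows cols r c 0))))
      = pvMask maze rows cols r c := by
  unfold pvEBot pvERgt pvEMid pvELft pvETop pvMask
  by_cases hw : pvGet2 maze r c = pvWALL
  · simp only [hw, ne_eq, not_true_eq_false, true_and, and_true, if_false]
    simp [Bool.or_eq_true, Bool.and_eq_true, decide_eq_true_eq, Bool.not_eq_true',
      Bool.or_eq_false_iff, Bool.and_eq_false_iff, decide_eq_false_iff_not]
    split_ifs <;> first | rfl | decide | omega | tauto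
  · simp [hw]

-- the scalar pass over all sources computes B's mask
theorem pvScalar (maze : List (List Int)) (rows cols r c : Int)
    (hr : 0 ≤ r) (hr2 : r < rows) (hc : 0 ≤ c) (hc2 : c < cols) :
    (PySem.List.pyRange 0 rows 1).foldl (fun a row =>
        (PySem.List.pyRange 0 cols 1).foldl (fun a col =>
          pvEff maze rows cols r c (row, col) a) a) 0
      = pvMask maze rows cols r c := by
  have hrowfar : ∀ row', row' ≠ r - 1 → row' ≠ r → row' ≠ r + 1 →
      ∀ a : Int, (PySem.List.pyRange 0 cols 1).foldl (fun a col => pvEff maze rows cols r c (row', col) a) a = a := by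
    intro row' k3 k4 k5 a
    refine pvFoldl_id _ _ _ (fun col hcol b => ?_)
    exact pvEff_id maze rows cols r c row' col (fun h => absurd h.1 (by omega))
      (fun h => absurd h.1 (by omega)) (fun h => absurd h.1 (by omega))
      (fun h => absurd h.1 (by omega)) (fun h => absurd h.1 (by omega)) b
  have hseg1 : ∀ a : Int, (PySem.List.pyRange 0 r 1).foldl (fun a row =>
      (PySem.List.pyRange 0 cols 1).foldl (fun a col => pvEff maze rows cols r c (row, col) a) a) a
      = pvETop maze rows cols r c a := by
    intro a
    by_cases h0r : 0 < r
    · rw [pvFoldl_single 0 r (r-1) _ a (by omega) (by omega)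
        (fun x hx1 hx2 hxv b => hrowfar x hxv (by omega) (by omega) b)]
      rw [pvFoldl_single 0 cols c _ a hc hc2 (fun x hx1 hx2 hxv b =>
        pvEff_id maze rows cols r c (r-1) x (fun h => hxv h.2) (fun h => absurd h.1 (by omega))
          (fun h => absurd h.1 (by omega)) (fun h => absurd h.1 (by omega)) (fun h => absurd h.1 (by omega)) b)]
      rw [pvEff_top maze rows cols r c h0r hr2 a]
      unfold pvETop
      by_cases hX : pvGet2 maze r c = pvWALL ∧ pvGet2 maze (r-1) c ≠ pvWALL
      · rw [if_pos hX, if_pos ⟨h0r, hX.1, hX.2⟩]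
      · rw [if_neg hX, if_neg (fun h => hX ⟨h.2.1, h.2.2⟩)]
    · rw [show PySem.List.pyRange 0 r 1 = [] from PySem.List.pyRange_one_eq_nil (by omega), List.foldl_nil]
      unfold pvETop
      rw [if_neg (fun h => h0r h.1)]
  have hseg3 : ∀ a : Int, (PySem.List.pyRange (r+1) rows 1).foldl (fun a row =>
      (PySem.List.pyRange 0 cols 1).foldl (fun a col => pvEff maze rows cols r c (row, col) a) a) a
      = pvEBot maze rows cols r c a := by
    intro a
    by_cases hrr : r + 1 < rows
    · rw [pvFoldl_single (r+1) rows (r+1) _ a (by omega) hrr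
        (fun x hx1 hx2 hxv b => hrowfar x (by omega) (by omega) hxv b)]
      rw [pvFoldl_single 0 cols c _ a hc hc2 (fun x hx1 hx2 hxv b =>
        pvEff_id maze rows cols r c (r+1) x (fun h => absurd h.1 (by omega)) (fun h => absurd h.1 (by omega))
          (fun h => hxv h.2) (fun h => absurd h.1 (by omega)) (fun h => absurd h.1 (by omega)) b)]
      rw [pvEff_bot maze rows cols r c hr hrr a]
      unfold pvEBot
      by_cases hX : pvGet2 maze r c = pvWALL ∧ pvGet2 maze (r+1) c ≠ pvWALL
      · rw [if_pos hX, if_pos ⟨by omega, hX.1, hX.2⟩]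
      · rw [if_neg hX, if_neg (fun h => hX ⟨h.2.1, h.2.2⟩)]
    · rw [show PySem.List.pyRange (r+1) rows 1 = [] from PySem.List.pyRange_one_eq_nil (by omega), List.foldl_nil]
      unfold pvEBot
      rw [if_neg (fun h => absurd h.1 (by omega))]
  have hmidL : ∀ a : Int, (PySem.List.pyRange 0 c 1).foldl
      (fun a col => pvEff maze rows cols r c (r, col) a) a = pvELft maze rows cols r c a := by
    intro a
    by_cases h0c : 0 < c
    · rw [pvFoldl_single 0 c (c-1) _ a (by omega) (by omega) (fun x hx1 hx2 hxv b =>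
        pvEff_id maze rows cols r c r x (fun h => absurd h.1 (by omega)) (fun h => absurd h.2 (by omega))
          (fun h => absurd h.1 (by omega)) (fun h => absurd h.2 (by omega)) (fun h => absurd h.2 (by omega)) b)]
      rw [pvEff_left maze rows cols r c h0c hc2 a]
      unfold pvELft
      by_cases hX : pvGet2 maze r c = pvWALL ∧ pvGet2 maze r (c-1) ≠ pvWALL
      · rw [if_pos hX, if_pos ⟨h0c, hX.1, hX.2⟩]
      · rw [if_neg hX, if_neg (fun h => hX ⟨h.2.1, h.2.2⟩)]
    · rw [show PySem.List.pyRange 0 c 1 = [] from PySem.List.pyRange_one_eq_nil (by omega), List.foldl_nil]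
      unfold pvELft
      rw [if_neg (fun h => h0c h.1)]
  have hmidR : ∀ a : Int, (PySem.List.pyRange (c+1) cols 1).foldl
      (fun a col => pvEff maze rows cols r c (r, col) a) a = pvERgt maze rows cols r c a := by
    intro a
    by_cases hcc : c + 1 < cols
    · rw [pvFoldl_single (c+1) cols (c+1) _ a (by omega) hcc (fun x hx1 hx2 hxv b =>
        pvEff_id maze rows cols r c r x (fun h => absurd h.1 (by omega)) (fun h => absurd h.2 (by omega))
          (fun h => absurd h.1 (by omega)) (fun h => absurd h.2 (by omega)) (fun h => absurd h.2 (by omega)) b)]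
      rw [pvEff_right maze rows cols r c hc hcc a]
      unfold pvERgt
      by_cases hX : pvGet2 maze r c = pvWALL ∧ pvGet2 maze r (c+1) ≠ pvWALL
      · rw [if_pos hX, if_pos ⟨by omega, hX.1, hX.2⟩]
      · rw [if_neg hX, if_neg (fun h => hX ⟨h.2.1, h.2.2⟩)]
    · rw [show PySem.List.pyRange (c+1) cols 1 = [] from PySem.List.pyRange_one_eq_nil (by omega), List.foldl_nil]
      unfold pvERgt
      rw [if_neg (fun h => absurd h.1 (by omega))]
  have hmid : ∀ a : Int, (PySem.List.pyRange 0 cols 1).foldl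
      (fun a col => pvEff maze rows cols r c (r, col) a) a
      = pvERgt maze rows cols r c (pvEMid maze rows cols r c (pvELft maze rows cols r c a)) := by
    intro a
    rw [PySem.List.pyRange_one_append 0 c cols hc (by omega), List.foldl_append,
        PySem.List.pyRange_one_cons hc2, List.foldl_cons, hmidL]
    rw [pvEff_mid, hmidR]
  rw [PySem.List.pyRange_one_append 0 r rows hr (by omega), List.foldl_append,
      PySem.List.pyRange_one_cons hr2, List.foldl_cons, hseg1]
  rw [hmid, hseg3, pvCombine]

theorem pvGetRangeMap {β : Type} (f : Int → β) (b : Int) (k : Nat) (hk : (k : Int) < b) :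
    ((PySem.List.pyRange 0 b 1).map f)[k]? = some (f (k : Int)) := by
  rw [List.getElem?_map, PySem.List.pyRange_one, List.getElem?_map,
    List.getElem?_range (by omega)]
  simp

-- ===== VERDICT (by name: the statement is the Claim_ definition above) =====
theorem create_collision_map_spec : Claim_equal_create_collision_map := by
  intro maze rows cols _ _
  unfold Spec_create_collision_map
  have hA : create_collision_map maze rows cols
      = ((PySem.List.pyRange 0 rows 1).flatMap (fun row =>
          (PySem.List.pyRange 0 cols 1).map (fun col => (row, col)))).foldl
          (fun g s => pvStepA maze rows cols g s.1 s.2)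
          ((PySem.List.pyRange 0 rows 1).map
            (fun _ => (PySem.List.pyRange 0 cols 1).map (fun _ => (0 : Int)))) := by
    unfold create_collision_map
    rw [List.foldl_flatMap]
    simp only [List.foldl_map]
  have h0shape : pvShape rows cols ((PySem.List.pyRange 0 rows 1).map
      (fun _ => (PySem.List.pyRange 0 cols 1).map (fun _ => (0 : Int)))) := by
    constructor
    · simp [PySem.List.length_pyRange_one]
    · intro rw hrw
      simp only [List.mem_map] at hrw
      obtain ⟨x, -, rfl⟩ := hrw
      simp [PySem.List.length_pyRange_one]
  have hmem : ∀ s ∈ (PySem.List.pyRange 0 rows 1).flatMap (fun row =>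
      (PySem.List.pyRange 0 cols 1).map (fun col => (row, col))),
      0 ≤ s.1 ∧ s.1 < rows ∧ 0 ≤ s.2 ∧ s.2 < cols := by
    intro s hs
    simp only [List.mem_flatMap, List.mem_map, PySem.List.mem_pyRange_one] at hs
    obtain ⟨row, ⟨ha, hb⟩, col, ⟨hcx, hdx⟩, rfl⟩ := hs
    exact ⟨ha, hb, hcx, hdx⟩
  have hshapeA : pvShape rows cols (create_collision_map maze rows cols) := by
    rw [hA]; exact pvShape_fold _ _ _ _ _ h0shape
  have h0val : ∀ (r c : Int), 0 ≤ r → r < rows → 0 ≤ c → c < cols →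
      pvVal ((PySem.List.pyRange 0 rows 1).map
        (fun _ => (PySem.List.pyRange 0 cols 1).map (fun _ => (0 : Int)))) r c = 0 := by
    intro r c h1 h2 h3 h4
    unfold pvVal
    rw [pvGetRangeMap _ rows r.toNat (by omega)]
    simp only [Option.getD_some]
    rw [pvGetRangeMap _ cols c.toNat (by omega)]
    simp
  have hval : ∀ (r c : Int), 0 ≤ r → r < rows → 0 ≤ c → c < cols →
      pvVal (create_collision_map maze rows cols) r c = pvMask maze rows cols r c := by
    intro r c h1 h2 h3 h4
    rw [hA, pvVal_fold maze rows cols _ _ r c h0shape hmem h1 h2 h3 h4,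
        h0val r c h1 h2 h3 h4, List.foldl_flatMap]
    simp only [List.foldl_map]
    exact pvScalar maze rows cols r c h1 h2 h3 h4
  unfold create_collision_map_alt
  apply List.ext_getElem?
  intro n
  by_cases hn : n < rows.toNat
  · have hAn : n < (create_collision_map maze rows cols).length := by rw [hshapeA.1]; exact hn
    rw [List.getElem?_eq_getElem hAn,
        pvGetRangeMap _ rows n (by omega)]
    congr 1
    have hrowlen : (create_collision_map maze rows cols)[n].length = cols.toNat :=
      hshapeA.2 _ (List.getElem_mem hAn)
    apply List.ext_getElem?
    intro m
    by_cases hm : m < cols.toNat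
    · have hAm : m < (create_collision_map maze rows cols)[n].length := by rw [hrowlen]; exact hm
      rw [List.getElem?_eq_getElem hAm,
          pvGetRangeMap _ cols m (by omega)]
      have hv := hval (n : Int) (m : Int) (by omega) (by omega) (by omega) (by omega)
      unfold pvVal at hv
      rw [Int.toNat_natCast, Int.toNat_natCast, List.getElem?_eq_getElem hAn,
          Option.getD_some, List.getElem?_eq_getElem hAm, Option.getD_some] at hv
      rw [hv]
    · rw [List.getElem?_eq_none (by omega), List.getElem?_eq_none (by simp [PySem.List.length_pyRange_one]; omega)]
  · rw [List.getElem?_eq_none (by rw [hshapeA.1]; omega),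
        List.getElem?_eq_none (by simp [PySem.List.length_pyRange_one]; omega)]
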